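-- pv_equiv track=rewrite | github.com/zeynepahsenacikel/text_analyzer | text_analyzer.py | num_of_characters_v2
-- ===== SOURCE A (Python) =====
-- def num_of_characters_v2(text):  #number of characters in words only(not spaces, new lines or punctuation
--     p = 0
--     y = text.count("\n")
--     punctuation = "!#$%&()*+,./:;<=>?@[]\^_{|}~"
--
--     for i in text:
--         if i in punctuation:
--             p = p + 1  #number of punctuation
--
--     for word in text.split():  #get rid of the punctuation at the end of the word
--         if word[-1] in punctuation:
--             word = word[:-1]
--     b=0
--     for a in text.split():
--         if a[-1]== "'":
--             b=b+1
--
--     def without_space(text):  #num of characters excluding spaces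
--         c = 0
--         for z in text:
--             if z != " ":
--                 c = c + 1
--         return c
--
--     s = without_space(text)
--     return s - p - y - b
-- ===== SOURCE B (Python) =====
-- def num_of_characters_v2(text):
--     punctuation = "!#$%&()*+,./:;<=>?@[]\^_{|}~"
--     excluded = " \n" + punctuation
--     n = sum(1 for c in text if c not in excluded)
--     b = sum(1 for tok in text.split() if tok.endswith("'"))
--     return n - b
-- ===== Notes on version B (the rewrite author's own statement) =====
-- stated objective: simpler
-- what changed: Replaces A's four separate passes (punctuation count, newline count, dead trailing-punctuation loop, non-space count) by a single filtered pass counting characters that are neither space, newline nor punctuation, keeping only the apostrophe-suffix token correction.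
import Mathlib
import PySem

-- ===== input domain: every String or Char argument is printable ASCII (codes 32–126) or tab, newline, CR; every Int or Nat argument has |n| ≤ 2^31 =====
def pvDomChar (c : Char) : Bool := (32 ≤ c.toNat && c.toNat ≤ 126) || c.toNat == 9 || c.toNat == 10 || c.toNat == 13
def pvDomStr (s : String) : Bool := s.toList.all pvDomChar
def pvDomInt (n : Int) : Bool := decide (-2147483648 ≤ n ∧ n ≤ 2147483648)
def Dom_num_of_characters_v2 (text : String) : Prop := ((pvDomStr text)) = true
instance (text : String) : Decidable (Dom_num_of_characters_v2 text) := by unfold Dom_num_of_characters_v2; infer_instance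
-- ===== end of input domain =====

-- B replaces A's four separate scans (punctuation, newlines, a dead trailing-punctuation loop, non-space
-- chars) by one filtered pass plus the apostrophe-suffix token correction; objective: simpler.


-- ===== PORT A =====
-- punctuation = "!#$%&()*+,./:;<=>?@[]\^_{|}~"  (Python's "\^" is backslash then caret)
def pvPunct : List Char := "!#$%&()*+,./:;<=>?@[]\\^_{|}~".toList

def num_of_characters_v2 (text : String) : Int :=
  -- p: for i in text: if i in punctuation: p += 1
  let p : Int := text.toList.foldl (fun p i => if pvPunct.contains i then p + 1 else p) 0
  -- y = text.count("\n")
  let y : Int := (PySem.Str.count text "\n" : Int)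
  -- dead loop: 'for word in text.split(): if word[-1] in punctuation: word = word[:-1]'
  -- rebinds a local that is then discarded; ported as a discarded computation (word[-1] never
  -- raises: split() yields only nonempty words)
  let _dead := (PySem.Str.split₀ text).map (fun word =>
    if (PySem.Str.pyGet? word (-1)).any (fun c => pvPunct.contains c)
    then PySem.Str.slice word none (some (-1)) else word)
  -- b: for a in text.split(): if a[-1] == "'": b += 1
  let b : Int := (PySem.Str.split₀ text).foldl
    (fun b a => if PySem.Str.pyGet? a (-1) == some '\'' then b + 1 else b) 0
  -- s = without_space(text)
  let s : Int := text.toList.foldl (fun c z => if z != ' ' then c + 1 else c) 0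
  s - p - y - b

-- ===== PORT B =====
-- excluded = " \n" + punctuation
def pvExcluded : List Char := " \n".toList ++ pvPunct

def num_of_characters_v2_alt (text : String) : Int :=
  -- n = sum(1 for c in text if c not in excluded)
  let n : Int := (text.toList.countP (fun c => !pvExcluded.contains c) : Int)
  -- b = sum(1 for tok in text.split() if tok.endswith("'"))
  let b : Int := (((PySem.Str.split₀ text).filter (fun tok => PySem.Str.endswith tok "'")).length : Int)
  n - b

-- ===== PRECONDITION & SPEC =====
def Spec_num_of_characters_v2 (text : String) (out : Int) : Prop := out = num_of_characters_v2_alt text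
instance (text : String) (out : Int) : Decidable (Spec_num_of_characters_v2 text out) := by unfold Spec_num_of_characters_v2; infer_instance

-- ===== CLAIM (what is proved, stated in full; the proofs are below) =====
def Claim_equal_num_of_characters_v2 : Prop := ∀ (text : String), Dom_num_of_characters_v2 text → Spec_num_of_characters_v2 text (num_of_characters_v2 text)

-- ===== LEMMAS AND PROOFS =====

-- Chars.count with a single-character needle is List.count
lemma pv_count_go_single (c : Char) : ∀ (fuel : Nat) (l : List Char) (acc : Nat),
    l.length ≤ fuel → PySem.Chars.count.go [c] fuel l acc = acc + l.count c := by
  intro fuel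
  induction fuel with
  | zero =>
    intro l acc h
    cases l with
    | nil => simp [PySem.Chars.count.go]
    | cons x t => simp at h
  | succ n ih =>
    intro l acc h
    cases l with
    | nil => simp [PySem.Chars.count.go]
    | cons x t =>
      simp only [List.length_cons, Nat.succ_le_succ_iff] at h
      by_cases hx : x = c
      · subst hx
        rw [show PySem.Chars.count.go [x] (n + 1) (x :: t) acc
              = PySem.Chars.count.go [x] n t (acc + 1) by
            simp [PySem.Chars.count.go, List.isPrefixOf]]
        rw [ih t (acc + 1) h]
        simp
        omega
      · have hcx : (c == x) = false := beq_eq_false_iff_ne.mpr (fun hh => hx hh.symm)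
        rw [show PySem.Chars.count.go [c] (n + 1) (x :: t) acc
              = PySem.Chars.count.go [c] n t acc by
            simp [PySem.Chars.count.go, List.isPrefixOf, hcx]]
        rw [ih t acc h]
        simp [hx]

lemma pv_count_single (l : List Char) (c : Char) :
    PySem.Chars.count l [c] = l.count c := by
  rw [PySem.Chars.count, if_neg (by simp)]
  simpa using pv_count_go_single c l.length l 0 le_rfl

-- 'a[-1] == "'"' and 'a.endswith("'")'" agree on every list of characters
lemma pv_apos_eq (w : List Char) :
    (PySem.List.pyGet? w (-1) == some '\'') = PySem.Chars.endswith w ['\''] := by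
  rw [Bool.eq_iff_iff, beq_iff_eq, PySem.List.pyGet?_neg_one, PySem.Chars.endswith_iff]
  rw [List.getLast?_eq_some_iff]
  constructor
  · rintro ⟨ys, rfl⟩; exact ⟨ys, rfl⟩
  · rintro ⟨ys, rfl⟩; exact ⟨ys, rfl⟩

-- the one-pass count equals (non-spaces) − (punctuation) − (newlines), in additive Nat form
lemma pv_key (l : List Char) :
    l.countP (fun c => !pvExcluded.contains c) + l.countP pvPunct.contains + l.count '\n'
      = l.countP (fun z => z != ' ') := by
  induction l with
  | nil => simp
  | cons x t ih =>
    simp only [List.countP_cons, List.count_cons]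
    by_cases h1 : x = ' '
    · subst h1
      rw [if_neg (by decide : ¬ ((!pvExcluded.contains ' ') = true)),
          if_neg (by decide : ¬ (pvPunct.contains ' ' = true)),
          if_neg (by decide : ¬ ((' ' == '\n') = true)),
          if_neg (by decide : ¬ ((' ' != ' ') = true))]
      omega
    · by_cases h2 : x = '\n'
      · subst h2
        rw [if_neg (by decide : ¬ ((!pvExcluded.contains '\n') = true)),
            if_neg (by decide : ¬ (pvPunct.contains '\n' = true)),
            if_pos (by decide : (('\n' == '\n') = true)),
            if_pos (by decide : (('\n' != ' ') = true))]
        omega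
      · have hnl : ¬ ((x == '\n') = true) := by simp [h2]
        have hsp : (x != ' ') = true := bne_iff_ne.mpr h1
        by_cases h3 : pvPunct.contains x = true
        · have he : pvExcluded.contains x = true := by
            show ((' ' :: '\n' :: pvPunct).contains x) = true
            have : x ∈ pvPunct := by simpa using h3
            simp [this]
          rw [if_neg (by rw [he]; decide), if_pos h3, if_neg hnl, if_pos hsp]
          omega
        · have he : pvExcluded.contains x = false := by
            show ((' ' :: '\n' :: pvPunct).contains x) = false
            have hm : x ∉ pvPunct := by simpa using h3
            simp [h1, h2, hm]
          rw [if_pos (by rw [he]; decide), if_neg h3, if_neg hnl, if_pos hsp]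
          omega

-- ===== VERDICT (by name: the statement is the Claim_ definition above) =====
theorem num_of_characters_v2_spec : Claim_equal_num_of_characters_v2 := by
  intro text _
  show num_of_characters_v2 text = num_of_characters_v2_alt text
  unfold num_of_characters_v2 num_of_characters_v2_alt
  simp only [PySem.List.foldl_if_add_one, zero_add]
  rw [show PySem.Str.count text "\n" = text.toList.count '\n' by
        rw [PySem.Str.count]; exact pv_count_single _ _]
  rw [← List.countP_eq_length_filter]
  have hb : ((PySem.Str.split₀ text).countP
        (fun a => PySem.Str.pyGet? a (-1) == some '\''))
      = ((PySem.Str.split₀ text).countP (fun tok => PySem.Str.endswith tok "'")) := by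
    apply List.countP_congr
    intro w _
    have hq : ("'" : String).toList = ['\''] := rfl
    have h1 := pv_apos_eq w.toList
    simp only [PySem.Str.pyGet?, PySem.Str.endswith, PySem.Chars.pyGet?_eq_listPyGet?, hq]
    constructor
    · intro h; rw [← h1]; exact h
    · intro h; rw [h1]; exact h
  rw [hb]
  have hk := pv_key text.toList
  omega
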